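-- pv_equiv track=rewrite | github.com/hannhm1109/Python_Practice | 1.2_Exercies_Practice/Ex3.py | multListe
-- ===== SOURCE A (Python) =====
-- def multListe(L):
--
--     new_list = L[:]
--
--     for i in range(len(new_list)):
--         if i % 2 == 0:
--             new_list[i] = new_list[i] * 2
--         else :
--             new_list[i] = new_list[i] * 3
--     return new_list
-- ===== SOURCE B (Python) =====
-- def multListe(L):
--     r = L[:]
--     r[0::2] = [x * 2 for x in r[0::2]]
--     r[1::2] = [x * 3 for x in r[1::2]]
--     return r
-- ===== Notes on version B (the rewrite author's own statement) =====
-- stated objective: alternative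
-- what changed: Replaces the single index loop with an in-place parity branch by two branch-free strided-slice passes: the even-indexed slice is mapped by *2 and the odd-indexed slice by *3, then reassigned.
import Mathlib
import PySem

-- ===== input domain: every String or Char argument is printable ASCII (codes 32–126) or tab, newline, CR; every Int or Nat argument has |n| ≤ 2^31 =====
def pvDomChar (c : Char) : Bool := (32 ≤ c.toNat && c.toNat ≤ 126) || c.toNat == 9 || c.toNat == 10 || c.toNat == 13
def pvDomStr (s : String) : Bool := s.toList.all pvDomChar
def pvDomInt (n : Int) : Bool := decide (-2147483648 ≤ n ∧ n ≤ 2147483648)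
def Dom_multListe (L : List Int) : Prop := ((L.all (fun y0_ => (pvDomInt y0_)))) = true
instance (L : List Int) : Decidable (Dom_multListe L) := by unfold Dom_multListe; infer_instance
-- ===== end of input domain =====

-- B replaces the index loop with a parity branch by two branch-free strided-slice passes (alternative decomposition, same cost).

-- ===== PORT A =====
def multListe (L : List Int) : List Int :=
  (PySem.List.pyRange 0 (PySem.List.len L) 1).foldl
    (fun new_list i =>
      if PySem.Int.mod i 2 = 0 then
        PySem.List.pySetD new_list i (PySem.List.pyGetD new_list i 0 * 2)
      else
        PySem.List.pySetD new_list i (PySem.List.pyGetD new_list i 0 * 3)) L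

-- ===== PORT B =====
-- Hand-ports of Python's stride-2 slicing, exact for step 2 on any list:
-- pvStride2 xs = xs[0::2]; xs.tail fed to it gives xs[1::2].
def pvStride2 : List Int → List Int
  | [] => []
  | [x] => [x]
  | x :: _ :: rest => x :: pvStride2 rest

-- Exact for Python's strided-slice assignment r[0::2] = es; r[1::2] = os when
-- es = map f r[0::2] and os = map g r[1::2] (the lengths match by construction):
-- the result interleaves es with os starting from es.
def pvInterleave : List Int → List Int → List Int
  | [], _ => []
  | e :: es, os => e :: pvInterleave os es
  termination_by es os => es.length + os.length

def multListe_alt (L : List Int) : List Int :=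
  pvInterleave ((pvStride2 L).map (fun x => x * 2)) ((pvStride2 L.tail).map (fun x => x * 3))

-- ===== PRECONDITION & SPEC =====
def Spec_multListe (L : List Int) (out : List Int) : Prop := out = multListe_alt L
instance (L : List Int) (out : List Int) : Decidable (Spec_multListe L out) := by unfold Spec_multListe; infer_instance

-- ===== CLAIM (what is proved, stated in full; the proofs are below) =====
def Claim_equal_multListe : Prop := ∀ (L : List Int), Dom_multListe L → Spec_multListe L (multListe L)

-- ===== LEMMAS AND PROOFS =====

/-- Reference spec: multiply position (k + offset) by 2 if even, 3 if odd. -/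
def pvGo (k : Nat) : List Int → List Int
  | [] => []
  | x :: xs => (if k % 2 = 0 then x * 2 else x * 3) :: pvGo (k + 1) xs

theorem pvGo_length (k : Nat) (xs : List Int) : (pvGo k xs).length = xs.length := by
  induction xs generalizing k with
  | nil => rfl
  | cons x xs ih => simp [pvGo, ih]

theorem pvGo_parity (k : Nat) (xs : List Int) : pvGo (k + 2) xs = pvGo k xs := by
  induction xs generalizing k with
  | nil => rfl
  | cons x xs ih =>
    simp only [pvGo, Nat.add_mod_right]
    rw [show k + 2 + 1 = (k + 1) + 2 by omega, ih]

theorem pvGo_snoc (k : Nat) (xs : List Int) (y : Int) :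
    pvGo k (xs ++ [y]) = pvGo k xs ++ [if (k + xs.length) % 2 = 0 then y * 2 else y * 3] := by
  induction xs generalizing k with
  | nil => simp [pvGo]
  | cons x xs ih =>
    simp only [List.cons_append, pvGo, ih, List.length_cons]
    rw [show k + 1 + xs.length = k + (xs.length + 1) by omega]
    rfl

theorem pvStride2_cons (y : Int) (r : List Int) :
    pvStride2 (y :: r) = y :: pvStride2 r.tail := by
  cases r <;> rfl

theorem pvB_eq_go (L : List Int) : multListe_alt L = pvGo 0 L := by
  unfold multListe_alt
  induction L using pvStride2.induct with
  | case1 => simp [pvStride2, pvInterleave, pvGo]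
  | case2 x => simp [pvStride2, pvInterleave, pvGo]
  | case3 x y rest ih =>
    simp only [pvStride2, List.tail_cons, pvStride2_cons, List.map_cons, pvInterleave, ih, pvGo]
    norm_num [← pvGo_parity 0 rest]

theorem pvA_inv (L : List Int) (n : Nat) (hn : n ≤ L.length) :
    (PySem.List.pyRange 0 (n : Int) 1).foldl
      (fun new_list i =>
        if PySem.Int.mod i 2 = 0 then
          PySem.List.pySetD new_list i (PySem.List.pyGetD new_list i 0 * 2)
        else
          PySem.List.pySetD new_list i (PySem.List.pyGetD new_list i 0 * 3)) L
      = pvGo 0 (L.take n) ++ L.drop n := by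
  induction n with
  | zero => simp [pvGo]
  | succ n ih =>
    have hn' : n ≤ L.length := by omega
    have hlt : n < L.length := by omega
    rw [show ((n + 1 : Nat) : Int) = (n : Int) + 1 by push_cast; ring,
        PySem.List.pyRange_one_succ_right (by positivity), List.foldl_append, ih hn']
    have hlen : (pvGo 0 (L.take n)).length = n := by
      rw [pvGo_length, List.length_take]; omega
    have hdrop : L.drop n = L[n] :: L.drop (n + 1) := List.drop_eq_getElem_cons hlt
    have hget : PySem.List.pyGetD (pvGo 0 (L.take n) ++ L.drop n) (n : Int) 0 = L[n] := by
      rw [PySem.List.pyGetD_natCast, hdrop, List.getD_eq_getElem?_getD,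
          List.getElem?_append_right (by omega), hlen]
      simp [List.getElem?_eq_getElem hlt]
    have hmod : PySem.Int.mod (n : Int) 2 = ((n % 2 : Nat) : Int) := by
      exact_mod_cast PySem.Int.mod_natCast n 2
    have hset : ∀ v : Int, (pvGo 0 (L.take n) ++ L.drop n).set n v
        = pvGo 0 (L.take n) ++ v :: L.drop (n + 1) := by
      intro v
      rw [List.set_append_right _ _ (by omega), hlen, Nat.sub_self, hdrop,
        List.set_cons_zero]
    have htake : L.take (n + 1) = L.take n ++ [L[n]] := by
      rw [List.take_add_one, List.getElem?_eq_getElem hlt]; rfl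
    simp only [List.foldl_cons, List.foldl_nil, hget, hmod,
      PySem.List.pySetD_natCast, hset]
    rw [htake, pvGo_snoc]
    simp only [Nat.zero_add, List.length_take, min_eq_left hn']
    simp only [Int.natCast_eq_zero]
    split_ifs with h <;> simp
theorem pvA_eq_go (L : List Int) : multListe L = pvGo 0 L := by
  have := pvA_inv L L.length le_rfl
  simpa [multListe] using this

-- ===== VERDICT (by name: the statement is the Claim_ definition above) =====
theorem multListe_spec : Claim_equal_multListe := by
  intro L _
  unfold Spec_multListe
  rw [pvA_eq_go, pvB_eq_go]
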